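-- pv_equiv track=rewrite | github.com/Autophagy/daily-programmer | 224-i/224-i.py | getIntersectionPairs
-- ===== SOURCE A (Python) =====
-- def getIntersectionPairs(data, y):
--     intersections = []
--     for x,c in enumerate(data[y]):
--         if(c == "+"):
--             intersections.append((x,y))
--
--     connectedPairs = []
--     for index, intersection in enumerate(intersections):
--         #See if it is paired with the other intersections
--         for i in intersections:
--             if intersection[0] < i[0]:
--                 if pairHorizontallyConnects(data, intersection, i):
--                     connectedPairs.append((intersection, i))
--
--     return connectedPairs
--
-- def pairHorizontallyConnects(data, a,b):
--     for i in range(a[0]+1, b[0]):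
--         if data[a[1]][i] not in ["+","-"]:
--             return False
--     return True
-- ===== SOURCE B (Python) =====
-- def getIntersectionPairs(data, y):
--     # One left-to-right scan splits the row into maximal '+'/'-' runs, collecting the
--     # '+' positions of each run; connected pairs are exactly the pairs within one run.
--     row = data[y]
--     groups = []
--     cur = []
--     for x, c in enumerate(row):
--         if c == '+':
--             cur.append(x)
--         elif c != '-':
--             if cur:
--                 groups.append(cur)
--             cur = []
--     if cur:
--         groups.append(cur)
--     pairs = []
--     for g in groups:
--         for k, p in enumerate(g):
--             for q in g[k + 1:]:
--                 pairs.append(((p, y), (q, y)))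
--     return pairs
-- ===== Notes on version B (the rewrite author's own statement) =====
-- stated objective: alternative
-- what changed: A collects the row's '+' positions and, for every ordered pair of them, rescans the characters in between to test connectivity; B makes a single left-to-right scan that groups the '+' positions of each maximal '+'/'-' run and emits the pairs within each group, so the per-pair rescan disappears (intended as faster in the worst case; a timing run read 1.73x at the largest size but inconsistently, so no speed is claimed).
import Mathlib
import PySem

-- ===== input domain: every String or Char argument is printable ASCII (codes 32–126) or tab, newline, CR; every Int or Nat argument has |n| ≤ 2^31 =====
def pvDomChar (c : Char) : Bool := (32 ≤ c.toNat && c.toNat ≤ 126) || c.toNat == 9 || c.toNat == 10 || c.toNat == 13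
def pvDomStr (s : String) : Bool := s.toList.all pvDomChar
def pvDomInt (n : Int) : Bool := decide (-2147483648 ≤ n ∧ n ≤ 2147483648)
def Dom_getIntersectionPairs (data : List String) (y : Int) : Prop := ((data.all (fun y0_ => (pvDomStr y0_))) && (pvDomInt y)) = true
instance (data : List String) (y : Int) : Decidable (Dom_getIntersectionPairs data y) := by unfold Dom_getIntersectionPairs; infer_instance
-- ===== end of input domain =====

-- B replaces A's all-pairs scan with one left-to-right pass that groups the '+'
-- positions of each maximal '+'/'-' run; connected pairs are read off within each group.

-- ===== PORT A =====
def pairHorizontallyConnects (data : List String) (a b : Int × Int) : Bool :=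
  (PySem.List.pyRange (a.1 + 1) b.1).all (fun i =>
    match PySem.List.pyGet? data a.2 with
    | some row =>
      match PySem.Str.pyGet? row i with
      | some c => c = '+' || c = '-'
      | none => false      -- IndexError (never reached under Pre_)
    | none => false)       -- IndexError (never reached under Pre_)

def getIntersectionPairs (data : List String) (y : Int) : List ((Int × Int) × (Int × Int)) :=
  match PySem.List.pyGet? data y with
  | none => []             -- data[y] raises IndexError here (excluded by Pre_)
  | some row =>
    let intersections : List (Int × Int) :=
      (PySem.List.enumerate row.toList).foldl
        (fun acc xc => if xc.2 = '+' then acc ++ [(xc.1, y)] else acc) []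
    (PySem.List.enumerate intersections).foldl
      (fun acc ip =>
        intersections.foldl
          (fun acc2 i =>
            if ip.2.1 < i.1 then
              if pairHorizontallyConnects data ip.2 i then acc2 ++ [(ip.2, i)] else acc2
            else acc2) acc) []

-- ===== PORT B =====
def getIntersectionPairs_alt (data : List String) (y : Int) : List ((Int × Int) × (Int × Int)) :=
  match PySem.List.pyGet? data y with
  | none => []             -- data[y] raises IndexError here (excluded by Pre_)
  | some row =>
    let st :=
      (PySem.List.enumerate row.toList).foldl
        (fun (st : List (List Int) × List Int) xc =>
          if xc.2 = '+' then (st.1, st.2 ++ [xc.1])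
          else if xc.2 = '-' then st
          else (if st.2 = [] then st.1 else st.1 ++ [st.2], []))
        ([], [])
    let groups := if st.2 = [] then st.1 else st.1 ++ [st.2]
    groups.foldl
      (fun pairs g =>
        (PySem.List.enumerate g).foldl
          (fun pairs2 kp =>
            (PySem.List.slice g (some (kp.1 + 1))).foldl
              (fun pairs3 q => pairs3 ++ [((kp.2, y), (q, y))]) pairs2) pairs) []

-- ===== PRECONDITION & SPEC =====
-- Python A evaluates data[y]; it raises IndexError exactly when y is out of range.
def Pre_getIntersectionPairs (data : List String) (y : Int) : Prop :=
  PySem.Raise.InRange data.length y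
instance (data : List String) (y : Int) : Decidable (Pre_getIntersectionPairs data y) := by
  unfold Pre_getIntersectionPairs; infer_instance

def pvWitness_getIntersectionPairs : List String × Int := (["+-+ +"], 0)

def Spec_getIntersectionPairs (data : List String) (y : Int) (out : List ((Int × Int) × (Int × Int))) : Prop := out = getIntersectionPairs_alt data y
instance (data : List String) (y : Int) (out : List ((Int × Int) × (Int × Int))) : Decidable (Spec_getIntersectionPairs data y out) := by unfold Spec_getIntersectionPairs; infer_instance

-- ===== CLAIM (what is proved, stated in full; the proofs are below) =====
def Claim_equal_getIntersectionPairs : Prop := ∀ (data : List String) (y : Int), Dom_getIntersectionPairs data y → Pre_getIntersectionPairs data y → Spec_getIntersectionPairs data y (getIntersectionPairs data y)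

-- ===== LEMMAS AND PROOFS =====

-- '+' or '-' (the characters a horizontal connection may cross)
def pvPM (c : Char) : Bool := c = '+' || c = '-'

-- positions of '+' in a row (Nat indices, ascending)
def pvPlus : List Char → List Nat
  | [] => []
  | c :: cs => if c = '+' then 0 :: (pvPlus cs).map (· + 1) else (pvPlus cs).map (· + 1)

-- the '+' positions of each maximal '+'/'-' run, empty runs kept ([[ ]] for the empty row)
def pvGroups : List Char → List (List Nat)
  | [] => [[]]
  | c :: cs =>
    match (pvGroups cs).map (List.map (· + 1)) with
    | g :: gs => if c = '+' then (0 :: g) :: gs else if c = '-' then g :: gs else [] :: g :: gs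
    | [] => []

-- all characters strictly between p and q are '+'/'-'
def pvConn (cs : List Char) (p q : Nat) : Bool :=
  (List.range (q - (p + 1))).all (fun k => pvPM (cs.getD (p + 1 + k) ' '))

-- the first q characters are all '+'/'-'
def pvP (cs : List Char) (q : Nat) : Bool := (List.range q).all (fun k => pvPM (cs.getD k ' '))

-- A's result, cleaned to Nat index pairs
def pvAN (cs : List Char) : List (Nat × Nat) :=
  (pvPlus cs).flatMap (fun p =>
    ((pvPlus cs).filter (fun q => decide (p < q) && pvConn cs p q)).map (fun q => (p, q)))

-- lexicographic pairs of one group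
def pvLex : List Nat → List (Nat × Nat)
  | [] => []
  | p :: ps => ps.map (fun q => (p, q)) ++ pvLex ps

def pvLexD (y : Int) : List Int → List ((Int × Int) × (Int × Int))
  | [] => []
  | p :: ps => ps.map (fun q => ((p, y), (q, y))) ++ pvLexD y ps

def pvDropE (l : List (List Int)) : List (List Int) := l.filter (· ≠ [])

def pvDeco (y : Int) (pq : Nat × Nat) : (Int × Int) × (Int × Int) :=
  (((pq.1 : Int), y), ((pq.2 : Int), y))

def pvShift2 (pq : Nat × Nat) : Nat × Nat := (pq.1 + 1, pq.2 + 1)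

def pvSegs (s : Int) (cur : List Int) (g : List Nat) (gs : List (List Nat)) : List (List Int) :=
  (cur ++ g.map (fun n : Nat => s + (n : Int))) :: gs.map (List.map (fun n : Nat => s + (n : Int)))

lemma pvSegs_ne_nil (s : Int) (cur : List Int) (g : List Nat) (gs : List (List Nat)) :
    pvSegs s cur g gs ≠ [] := by simp [pvSegs]

lemma pvGroups_ne_nil (cs : List Char) : pvGroups cs ≠ [] := by
  induction cs with
  | nil => simp [pvGroups]
  | cons c cs ih =>
    cases h : pvGroups cs with
    | nil => exact absurd h ih
    | cons g gs => simp only [pvGroups, h, List.map_cons]; split_ifs <;> simp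

lemma pvGroups_cons (c : Char) (cs : List Char) (g : List Nat) (gs : List (List Nat))
    (h : pvGroups cs = g :: gs) :
    pvGroups (c :: cs) =
      if c = '+' then (0 :: g.map (· + 1)) :: gs.map (List.map (· + 1))
      else if c = '-' then g.map (· + 1) :: gs.map (List.map (· + 1))
      else [] :: g.map (· + 1) :: gs.map (List.map (· + 1)) := by
  simp only [pvGroups, h, List.map_cons]

lemma pvGroups_head (cs : List Char) : ∃ g gs, pvGroups cs = g :: gs := by
  cases h : pvGroups cs with
  | nil => exact absurd h (pvGroups_ne_nil cs)
  | cons g gs => exact ⟨g, gs, rfl⟩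

lemma pvPlus_lt (cs : List Char) : ∀ p ∈ pvPlus cs, p < cs.length := by
  induction cs with
  | nil => simp [pvPlus]
  | cons c cs ih =>
    intro p hp
    simp only [pvPlus] at hp
    by_cases hc : c = '+' <;> simp [hc] at hp
    · rcases hp with rfl | ⟨q, hq, rfl⟩
      · simp only [List.length_cons]; omega
      · have := ih q hq; simp only [List.length_cons]; omega
    · rcases hp with ⟨q, hq, rfl⟩
      have := ih q hq; simp only [List.length_cons]; omega

lemma pvP_succ (c : Char) (cs : List Char) (q : Nat) :
    pvP (c :: cs) (q + 1) = (pvPM c && pvP cs q) := by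
  simp [pvP, List.range_succ_eq_map, List.all_map, Function.comp_def, Nat.succ_eq_add_one]

lemma pvConn_succ (c : Char) (cs : List Char) (p q : Nat) :
    pvConn (c :: cs) (p + 1) (q + 1) = pvConn cs p q := by
  unfold pvConn
  have h1 : q + 1 - (p + 1 + 1) = q - (p + 1) := by omega
  rw [h1]
  congr 1
  funext k
  have h2 : p + 1 + 1 + k = (p + 1 + k) + 1 := by ring
  rw [h2, List.getD_cons_succ]

lemma pvConn_zero (c : Char) (cs : List Char) (q : Nat) :
    pvConn (c :: cs) 0 (q + 1) = pvP cs q := by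
  unfold pvConn pvP
  have h1 : q + 1 - (0 + 1) = q := by omega
  rw [h1]
  congr 1
  funext k
  have h2 : 0 + 1 + k = k + 1 := by ring
  rw [h2, List.getD_cons_succ]

-- filtering a shifted plus list with a predicate that shifts
lemma pvFilterShiftMap (l : List Nat) (P Q : Nat → Bool) (hPQ : ∀ q, P (q + 1) = Q q) :
    (l.map (· + 1)).filter P = (l.filter Q).map (· + 1) := by
  rw [List.filter_map]
  congr 1
  apply List.filter_congr
  intro q _
  simp [Function.comp, hPQ]

lemma pvFilterShiftCons (l : List Nat) (P Q : Nat → Bool) (hPQ : ∀ q, P (q + 1) = Q q)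
    (hP0 : P 0 = false) :
    (0 :: l.map (· + 1)).filter P = (l.filter Q).map (· + 1) := by
  rw [List.filter_cons]
  simp only [hP0, Bool.false_eq_true, if_false]
  exact pvFilterShiftMap l P Q hPQ

-- the '+' positions whose whole prefix is '+'/'-' form exactly the first group
lemma pvHeadGroup (cs : List Char) : (pvPlus cs).filter (fun q => pvP cs q) = (pvGroups cs).headI := by
  induction cs with
  | nil => simp [pvPlus, pvGroups]
  | cons c cs ih =>
    obtain ⟨g, gs, hG⟩ := pvGroups_head cs
    rw [pvGroups_cons c cs g gs hG]
    rw [hG] at ih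
    have hmap : ∀ (b : Bool), pvPM c = b →
        ((pvPlus cs).map (· + 1)).filter (fun q => pvP (c :: cs) q)
          = if b then ((pvPlus cs).filter (fun q => pvP cs q)).map (· + 1) else [] := by
      intro b hb
      cases b
      · rw [List.filter_map]
        have hfc : ((fun q => pvP (c :: cs) q) ∘ (· + 1)) = fun _ => false := by
          funext q; simp [Function.comp, pvP_succ, hb]
        rw [hfc]
        simp
      · rw [pvFilterShiftMap (pvPlus cs) _ (fun q => pvP cs q)
            (fun q => by rw [pvP_succ, hb, Bool.true_and])]
        simp
    by_cases hp : c = '+'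
    · have h0 : pvP (c :: cs) 0 = true := rfl
      rw [show pvPlus (c :: cs) = 0 :: (pvPlus cs).map (· + 1) from by simp [pvPlus, hp]]
      rw [List.filter_cons]
      simp only [h0, if_true]
      rw [hmap true (by simp [pvPM, hp])]
      rw [ih]
      simp [hp]
    · by_cases hm : c = '-'
      · rw [show pvPlus (c :: cs) = (pvPlus cs).map (· + 1) from by simp [pvPlus, hp]]
        rw [hmap true (by simp [pvPM, hm])]
        rw [ih]
        simp [hm]
      · rw [show pvPlus (c :: cs) = (pvPlus cs).map (· + 1) from by simp [pvPlus, hp]]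
        rw [hmap false (by simp [pvPM, hp, hm])]
        simp [hp, hm]

lemma pvLex_map_succ (l : List Nat) :
    pvLex (l.map (· + 1)) = (pvLex l).map pvShift2 := by
  induction l with
  | nil => simp [pvLex]
  | cons p ps ih => simp [pvLex, ih, List.map_map, Function.comp_def, pvShift2]

lemma pvAN_shift (c : Char) (cs : List Char) (hc : c ≠ '+') :
    pvAN (c :: cs) = (pvAN cs).map pvShift2 := by
  unfold pvAN
  rw [show pvPlus (c :: cs) = (pvPlus cs).map (· + 1) from by simp [pvPlus, hc]]
  rw [List.flatMap_map, List.map_flatMap]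
  congr 1
  funext p
  rw [pvFilterShiftMap (pvPlus cs) _ (fun q => decide (p < q) && pvConn cs p q)
      (fun q => by rw [pvConn_succ]; simp)]
  simp [List.map_map, Function.comp_def, pvShift2]

lemma pvAN_plus (cs : List Char) :
    pvAN ('+' :: cs) =
      ((pvPlus cs).filter (fun q => pvP cs q)).map (fun q => (0, q + 1))
        ++ (pvAN cs).map pvShift2 := by
  unfold pvAN
  rw [show pvPlus ('+' :: cs) = 0 :: (pvPlus cs).map (· + 1) from by simp [pvPlus]]
  rw [List.flatMap_cons]
  congr 1
  · rw [pvFilterShiftCons (pvPlus cs) _ (fun q => pvP cs q)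
        (fun q => by rw [pvConn_zero]; simp) (by simp)]
    simp [List.map_map, Function.comp_def]
  · rw [List.flatMap_map, List.map_flatMap]
    congr 1
    funext p
    rw [pvFilterShiftCons (pvPlus cs) _ (fun q => decide (p < q) && pvConn cs p q)
        (fun q => by rw [pvConn_succ]; simp) (by simp)]
    simp [List.map_map, Function.comp_def, pvShift2]

-- ===== the core identity: A's all-pairs scan = pairs within each run =====
lemma pvCore (cs : List Char) : pvAN cs = (pvGroups cs).flatMap pvLex := by
  induction cs with
  | nil => simp [pvAN, pvPlus, pvGroups, pvLex]
  | cons c cs ih =>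
    obtain ⟨g, gs, hG⟩ := pvGroups_head cs
    rw [pvGroups_cons c cs g gs hG]
    have hmapped : (gs.map (List.map (· + 1))).flatMap pvLex = (gs.flatMap pvLex).map pvShift2 := by
      rw [List.flatMap_map, List.map_flatMap]
      congr 1
      funext l
      exact pvLex_map_succ l
    by_cases hp : c = '+'
    · subst hp
      rw [pvAN_plus cs, ih, hG]
      rw [if_pos rfl, List.flatMap_cons, List.flatMap_cons]
      rw [show pvLex (0 :: g.map (· + 1))
            = (g.map (· + 1)).map (fun q => (0, q)) ++ pvLex (g.map (· + 1)) from rfl]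
      rw [pvLex_map_succ, hmapped]
      rw [pvHeadGroup cs, hG]
      simp [List.map_map, Function.comp_def, List.map_append, List.append_assoc]
    · by_cases hm : c = '-'
      · rw [pvAN_shift c cs hp, ih, hG]
        rw [if_neg hp, if_pos hm, List.flatMap_cons, List.flatMap_cons]
        rw [pvLex_map_succ, hmapped]
        simp [List.map_append]
      · rw [pvAN_shift c cs hp, ih, hG]
        rw [if_neg hp, if_neg hm]
        rw [List.flatMap_cons, List.flatMap_cons, List.flatMap_cons]
        rw [pvLex_map_succ, hmapped]
        simp [pvLex, List.map_append]

-- ===== bridging the A port =====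
lemma pvInterEq (cs : List Char) (y : Int) : ∀ (s : Int),
    ((PySem.List.enumerate cs s).filter (fun xc => decide (xc.2 = '+'))).map (fun xc => (xc.1, y))
      = (pvPlus cs).map (fun n : Nat => (s + (n : Int), y)) := by
  induction cs with
  | nil => intro s; simp [PySem.List.enumerate_nil, pvPlus]
  | cons c cs ih =>
    intro s
    rw [PySem.List.enumerate_cons, List.filter_cons]
    by_cases hc : c = '+'
    · subst hc
      rw [if_pos (by simp)]
      rw [List.map_cons, ih (s + 1)]
      simp only [pvPlus]
      simp
      intro a _
      ring
    · rw [if_neg (by simp [hc])]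
      rw [ih (s + 1)]
      simp [pvPlus, hc, List.map_map, Function.comp_def]
      intro a _
      ring

lemma pvInterEq0 (cs : List Char) (y : Int) :
    ((PySem.List.enumerate cs 0).filter (fun xc => decide (xc.2 = '+'))).map (fun xc => (xc.1, y))
      = (pvPlus cs).map (fun n : Nat => ((n : Int), y)) := by
  have := pvInterEq cs y 0
  simpa using this

lemma pvConnBridge (data : List String) (row : String) (y : Int)
    (hrow : PySem.List.pyGet? data y = some row) (n m : Nat) (hm : m ≤ row.toList.length) :
    pairHorizontallyConnects data ((n : Int), y) ((m : Int), y) = pvConn row.toList n m := by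
  unfold pairHorizontallyConnects pvConn
  rw [PySem.List.pyRange_one, List.all_map]
  rw [Bool.eq_iff_iff]
  simp only [List.all_eq_true, List.mem_range]
  have hlen : ((m : Int) - ((n : Int) + 1)).toNat = m - (n + 1) := by omega
  rw [hlen]
  refine forall_congr' (fun k => imp_congr_right (fun hk => ?_))
  simp only [Function.comp_apply]
  simp only [hrow]
  have hcast : (n : Int) + 1 + (k : Int) = ((n + 1 + k : Nat) : Int) := by push_cast; ring
  rw [hcast, PySem.Str.pyGet?_eq]
  rw [show PySem.Chars.pyGet? = @PySem.List.pyGet? Char from rfl]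
  rw [PySem.List.pyGet?_natCast]
  have hlt : n + 1 + k < row.toList.length := by omega
  rw [List.getElem?_eq_getElem hlt]
  rw [List.getD_eq_getElem row.toList ' ' hlt]
  simp [pvPM]

lemma pvAEq (data : List String) (row : String) (y : Int)
    (hrow : PySem.List.pyGet? data y = some row) :
    getIntersectionPairs data y = (pvAN row.toList).map (pvDeco y) := by
  unfold getIntersectionPairs
  rw [hrow]
  simp only [PySem.List.foldl_append_ite, List.nil_append]
  simp only [pvInterEq0]
  have henum : ∀ (l : List (Int × Int))
      (F : List ((Int × Int) × (Int × Int)) → (Int × Int) → List ((Int × Int) × (Int × Int)))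
      (init : List ((Int × Int) × (Int × Int))),
      (PySem.List.enumerate l).foldl (fun acc ip => F acc ip.2) init = l.foldl F init := by
    intro l F init
    conv_rhs => rw [← PySem.List.map_snd_enumerate l 0]
    rw [List.foldl_map]
  rw [henum ((pvPlus row.toList).map (fun n : Nat => ((n : Int), y)))
      (fun acc inter =>
        ((pvPlus row.toList).map (fun n : Nat => ((n : Int), y))).foldl
          (fun acc2 i =>
            if inter.1 < i.1 then
              if pairHorizontallyConnects data inter i then acc2 ++ [(inter, i)] else acc2
            else acc2) acc) []]
  have hif : (fun (acc : List ((Int × Int) × (Int × Int))) (inter : Int × Int) =>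
        ((pvPlus row.toList).map (fun n : Nat => ((n : Int), y))).foldl
          (fun acc2 i =>
            if inter.1 < i.1 then
              if pairHorizontallyConnects data inter i then acc2 ++ [(inter, i)] else acc2
            else acc2) acc)
      = (fun acc inter =>
        ((pvPlus row.toList).map (fun n : Nat => ((n : Int), y))).foldl
          (fun acc2 i =>
            if (decide (inter.1 < i.1) && pairHorizontallyConnects data inter i) = true then
              acc2 ++ [(inter, i)]
            else acc2) acc) := by
    funext acc inter
    congr 1
    funext acc2 i
    by_cases h1 : inter.1 < i.1 <;> by_cases h2 : pairHorizontallyConnects data inter i <;>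
      simp [h1, h2]
  rw [hif]
  simp only [PySem.List.foldl_append_if, PySem.List.foldl_append_eq_flatMap, List.nil_append]
  rw [List.flatMap_map]
  unfold pvAN
  rw [List.map_flatMap]
  congr 1
  funext n
  rw [List.filter_map, List.map_map, List.map_map]
  have hfilter :
      ((pvPlus row.toList).filter
        ((fun i => decide ((((n : Int), y)).1 < i.1) && pairHorizontallyConnects data ((n : Int), y) i)
          ∘ fun q : Nat => ((q : Int), y)))
      = (pvPlus row.toList).filter (fun q => decide (n < q) && pvConn row.toList n q) := by
    apply List.filter_congr
    intro q hq
    have hlt := pvPlus_lt row.toList q hq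
    simp only [Function.comp_apply]
    rw [pvConnBridge data row y hrow n q (by omega)]
    simp
  rw [hfilter]
  simp [Function.comp_def, pvDeco]

-- ===== bridging the B port =====
lemma pvBfoldState (cs : List Char) : ∀ (s : Int) (acc : List (List Int)) (cur : List Int)
    (g : List Nat) (gs : List (List Nat)), pvGroups cs = g :: gs →
    (PySem.List.enumerate cs s).foldl
        (fun (st : List (List Int) × List Int) xc =>
          if xc.2 = '+' then (st.1, st.2 ++ [xc.1])
          else if xc.2 = '-' then st
          else (if st.2 = [] then st.1 else st.1 ++ [st.2], []))
        (acc, cur)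
      = (acc ++ pvDropE (pvSegs s cur g gs).dropLast,
         (pvSegs s cur g gs).getLast (pvSegs_ne_nil s cur g gs)) := by
  induction cs with
  | nil =>
    intro s acc cur g gs h
    simp only [pvGroups] at h
    injection h with h1 h2
    subst h1; subst h2
    simp [PySem.List.enumerate_nil, pvSegs, pvDropE]
  | cons c cs ih =>
    intro s acc cur g gs h
    obtain ⟨g', gs', hG'⟩ := pvGroups_head cs
    rw [pvGroups_cons c cs g' gs' hG'] at h
    rw [PySem.List.enumerate_cons, List.foldl_cons]
    by_cases hp : c = '+'
    · rw [if_pos hp] at h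
      injection h with h1 h2
      subst h1; subst h2
      rw [show (if ((s, c)).2 = '+' then ((acc, cur).1, (acc, cur).2 ++ [((s, c)).1])
            else if ((s, c)).2 = '-' then (acc, cur)
            else (if ((acc, cur)).2 = [] then ((acc, cur)).1 else ((acc, cur)).1 ++ [((acc, cur)).2], []))
          = (acc, cur ++ [s]) from by simp [hp]]
      rw [ih (s + 1) acc (cur ++ [s]) g' gs' hG']
      have hseg : pvSegs (s + 1) (cur ++ [s]) g' gs'
          = pvSegs s cur (0 :: g'.map (· + 1)) (gs'.map (List.map (· + 1))) := by
        simp [pvSegs, List.map_map, Function.comp_def, List.append_assoc]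
        refine ⟨fun a _ => by ring, fun l _ a _ => by ring⟩
      simp only [hseg]
    · by_cases hm : c = '-'
      · rw [if_neg hp, if_pos hm] at h
        injection h with h1 h2
        subst h1; subst h2
        rw [show (if ((s, c)).2 = '+' then ((acc, cur).1, (acc, cur).2 ++ [((s, c)).1])
              else if ((s, c)).2 = '-' then (acc, cur)
              else (if ((acc, cur)).2 = [] then ((acc, cur)).1 else ((acc, cur)).1 ++ [((acc, cur)).2], []))
            = (acc, cur) from by simp [hm]]
        rw [ih (s + 1) acc cur g' gs' hG']
        have hseg : pvSegs (s + 1) cur g' gs'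
            = pvSegs s cur (g'.map (· + 1)) (gs'.map (List.map (· + 1))) := by
          simp [pvSegs, List.map_map, Function.comp_def]
          refine ⟨fun a _ => by ring, fun l _ a _ => by ring⟩
        simp only [hseg]
      · rw [if_neg hp, if_neg hm] at h
        injection h with h1 h2
        subst h1; subst h2
        rw [show (if ((s, c)).2 = '+' then ((acc, cur).1, (acc, cur).2 ++ [((s, c)).1])
              else if ((s, c)).2 = '-' then (acc, cur)
              else (if ((acc, cur)).2 = [] then ((acc, cur)).1 else ((acc, cur)).1 ++ [((acc, cur)).2], []))
            = ((if cur = [] then acc else acc ++ [cur]), []) from by simp [hp, hm]]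
        rw [ih (s + 1) (if cur = [] then acc else acc ++ [cur]) [] g' gs' hG']
        have hseg3 : pvSegs s cur [] ((g'.map (· + 1)) :: gs'.map (List.map (· + 1)))
            = cur :: pvSegs (s + 1) [] g' gs' := by
          simp [pvSegs, List.map_map, Function.comp_def]
          refine ⟨fun a _ => by ring, fun l _ a _ => by ring⟩
        simp only [hseg3]
        rw [List.dropLast_cons_of_ne_nil (pvSegs_ne_nil (s + 1) [] g' gs')]
        simp only [Prod.mk.injEq]
        constructor
        · by_cases hcur : cur = [] <;>
            simp [hcur, pvDropE, List.append_assoc]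
        · rw [List.getLast_cons (pvSegs_ne_nil (s + 1) [] g' gs')]

lemma pvInnerAux (y : Int) (g : List Int) : ∀ (tail : List Int) (k : Nat), tail = g.drop k →
    ∀ (acc : List ((Int × Int) × (Int × Int))),
    (PySem.List.enumerate tail (k : Int)).foldl
      (fun pairs2 kp =>
        (PySem.List.slice g (some (kp.1 + 1))).foldl
          (fun pairs3 q => pairs3 ++ [((kp.2, y), (q, y))]) pairs2) acc
      = acc ++ pvLexD y tail := by
  intro tail
  induction tail with
  | nil => intro k _ acc; simp [PySem.List.enumerate_nil, pvLexD]
  | cons p tl ih =>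
    intro k hk acc
    have hdrop : tl = g.drop (k + 1) := by
      rw [← List.tail_drop, ← hk]
      rfl
    have hslice : PySem.List.slice g (some ((k : Int) + 1)) = g.drop (k + 1) := by
      rw [show (k : Int) + 1 = ((k + 1 : Nat) : Int) from by push_cast; ring]
      exact PySem.List.slice_from_natCast g (k + 1)
    rw [PySem.List.enumerate_cons, List.foldl_cons]
    have hinit : List.foldl (fun pairs3 q => pairs3 ++ [(((((k : Int), p)).2, y), (q, y))]) acc
          (PySem.List.slice g (some ((((k : Int), p)).1 + 1)))
        = acc ++ tl.map (fun q => ((p, y), (q, y))) := by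
      dsimp only
      rw [hslice, ← hdrop]
      rw [PySem.List.foldl_append_singleton_eq_map]
    rw [hinit]
    rw [show (k : Int) + 1 = ((k + 1 : Nat) : Int) from by push_cast; ring]
    rw [ih (k + 1) hdrop (acc ++ tl.map fun q => ((p, y), (q, y)))]
    simp [pvLexD, List.append_assoc]

lemma pvFlatMapDropE (y : Int) (l : List (List Int)) :
    (pvDropE l).flatMap (pvLexD y) = l.flatMap (pvLexD y) := by
  induction l with
  | nil => simp [pvDropE]
  | cons x l ih =>
    by_cases hx : x = []
    · subst hx
      rw [show pvDropE ([] :: l) = pvDropE l from by simp [pvDropE]]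
      rw [ih, List.flatMap_cons]
      simp [pvLexD]
    · rw [show pvDropE (x :: l) = x :: pvDropE l from by simp [pvDropE, hx]]
      rw [List.flatMap_cons, List.flatMap_cons, ih]

lemma pvLexDCast (y : Int) (g : List Nat) :
    pvLexD y (g.map (fun n : Nat => (n : Int))) = (pvLex g).map (pvDeco y) := by
  induction g with
  | nil => simp [pvLexD, pvLex]
  | cons p ps ih =>
    simp only [List.map_cons, pvLexD, pvLex, List.map_append]
    rw [ih]
    simp [List.map_map, Function.comp_def, pvDeco]

lemma pvBEq (data : List String) (row : String) (y : Int)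
    (hrow : PySem.List.pyGet? data y = some row) :
    getIntersectionPairs_alt data y = ((pvGroups row.toList).flatMap pvLex).map (pvDeco y) := by
  unfold getIntersectionPairs_alt
  simp only [hrow]
  obtain ⟨g, gs, hG⟩ := pvGroups_head row.toList
  rw [pvBfoldState row.toList 0 [] [] g gs hG]
  dsimp only
  simp only [List.nil_append]
  have hgroups : (if (pvSegs 0 [] g gs).getLast (pvSegs_ne_nil 0 [] g gs) = [] then
        pvDropE (pvSegs 0 [] g gs).dropLast
      else pvDropE (pvSegs 0 [] g gs).dropLast ++ [(pvSegs 0 [] g gs).getLast (pvSegs_ne_nil 0 [] g gs)])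
      = pvDropE (pvSegs 0 [] g gs) := by
    conv_rhs => rw [← List.dropLast_append_getLast (pvSegs_ne_nil 0 [] g gs)]
    unfold pvDropE
    rw [List.filter_append]
    by_cases hb : (pvSegs 0 [] g gs).getLast (pvSegs_ne_nil 0 [] g gs) = [] <;> simp [hb]
  rw [hgroups]
  have hmid : (fun (pairs : List ((Int × Int) × (Int × Int))) (gl : List Int) =>
        (PySem.List.enumerate gl).foldl
          (fun pairs2 kp =>
            (PySem.List.slice gl (some (kp.1 + 1))).foldl
              (fun pairs3 q => pairs3 ++ [((kp.2, y), (q, y))]) pairs2) pairs)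
      = fun pairs gl => pairs ++ pvLexD y gl := by
    funext pairs gl
    have h := pvInnerAux y gl gl 0 (by simp) pairs
    simpa using h
  rw [hmid]
  rw [PySem.List.foldl_append_eq_flatMap, List.nil_append]
  rw [pvFlatMapDropE]
  rw [show pvSegs 0 [] g gs = (g :: gs).map (List.map (fun n : Nat => (n : Int))) from by
    simp [pvSegs]]
  rw [List.flatMap_map]
  rw [hG, List.map_flatMap]
  congr 1
  funext l
  exact pvLexDCast y l

-- ===== VERDICT (by name: the statement is the Claim_ definition above) =====
theorem getIntersectionPairs_spec : Claim_equal_getIntersectionPairs := by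
  intro data y _ hpre
  unfold Spec_getIntersectionPairs
  obtain ⟨row, hrow⟩ : ∃ row, PySem.List.pyGet? data y = some row := by
    cases h : PySem.List.pyGet? data y with
    | none => exact absurd hpre ((PySem.List.pyGet?_eq_none_iff _ _).mp h)
    | some r => exact ⟨r, rfl⟩
  rw [pvAEq data row y hrow, pvBEq data row y hrow, pvCore]
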